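-- pv_equiv track=rewrite | github.com/cwb14/synLTR | module2/reconcile_nests.py | build_direct_children
-- ===== SOURCE A (Python) =====
-- from collections import defaultdict
-- from typing import Dict, List, Optional, Tuple
--
-- def build_direct_children(all_in: Dict[str, List[str]]) -> Dict[str, List[str]]:
--     """y is a direct child of x iff y in all_in[x] and no z in all_in[x]
--     has y in all_in[z]."""
--     children: Dict[str, List[str]] = defaultdict(list)
--     for xk, descendants in all_in.items():
--         desc_set = set(descendants)
--         for y in descendants:
--             is_direct = True
--             for z in descendants:
--                 if z == y:
--                     continue
--                 if y in all_in.get(z, ()):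
--                     is_direct = False
--                     break
--             if is_direct:
--                 children[xk].append(y)
--     return children
-- ===== SOURCE B (Python) =====
-- def build_direct_children(all_in):
--     """y is a direct child of x iff y in all_in[x] and no z in all_in[x]
--     has y in all_in[z].  Re-implementation via a precomputed inverted index
--     contained_by[y] = {z : y in all_in[z]}, removing the per-child scan of
--     the sibling lists."""
--     contained_by = {}
--     for z, ds in all_in.items():
--         for y in ds:
--             contained_by.setdefault(y, set()).add(z)
--     children = {}
--     for xk, descendants in all_in.items():
--         desc_set = set(descendants)
--         direct = [y for y in descendants
--                   if not ((contained_by.get(y, set()) & desc_set) - {y})]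
--         if direct:
--             children[xk] = direct
--     return children
-- ===== Notes on version B (the rewrite author's own statement) =====
-- stated objective: alternative
-- what changed: B first builds an inverted index contained_by[y] = {z : y in all_in[z]} in one pass and then decides directness of each descendant by intersecting that index entry with the sibling set, replacing A's per-child scan of the descendants with repeated dict lookups; Pre_ requires distinct keys in the association list, which merely encodes a Python dict (A's parameter type) and so cannot have duplicates.
import Mathlib
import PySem

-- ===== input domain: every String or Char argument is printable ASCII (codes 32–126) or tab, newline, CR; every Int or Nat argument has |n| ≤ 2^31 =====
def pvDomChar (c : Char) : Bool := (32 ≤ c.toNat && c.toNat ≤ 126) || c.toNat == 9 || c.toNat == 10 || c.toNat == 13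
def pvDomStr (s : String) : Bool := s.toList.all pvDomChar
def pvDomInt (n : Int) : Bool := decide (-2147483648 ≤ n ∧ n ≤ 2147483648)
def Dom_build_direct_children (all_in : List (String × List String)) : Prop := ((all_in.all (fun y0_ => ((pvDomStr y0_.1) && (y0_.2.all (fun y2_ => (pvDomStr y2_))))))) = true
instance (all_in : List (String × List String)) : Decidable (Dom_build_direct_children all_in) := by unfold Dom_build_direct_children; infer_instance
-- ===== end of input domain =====

-- B changes the decomposition: a precomputed inverted index contained_by[y] replaces A's
-- per-child rescans of all_in via the sibling list (objective: alternative data structure).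

-- ===== PORT A =====
-- inner 'for z in descendants: … break' loop of A, computing is_direct's negation
def aIndirect (all_in : List (String × List String)) (ds : List String) (y : String) : Bool :=
  ds.any (fun z => z != y && ((PySem.Dict.mk all_in).getD z []).contains y)

def build_direct_children (all_in : List (String × List String)) : List (String × List String) :=
  (all_in.foldl (fun children p =>
      p.2.foldl (fun ch y =>
        if !aIndirect all_in p.2 y then ch.insert p.1 (ch.getD p.1 [] ++ [y]) else ch) children)
    PySem.Dict.empty).items

-- ===== PORT B =====
-- contained_by[y] = set of keys z with y in all_in[z]
def bContainedBy (all_in : List (String × List String)) : PySem.Dict String (PySem.Set String) :=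
  all_in.foldl (fun cb p =>
      p.2.foldl (fun cb y => cb.modify y [] (fun s => PySem.Set.add s p.1)) cb)
    PySem.Dict.empty

def build_direct_children_alt (all_in : List (String × List String)) : List (String × List String) :=
  let cb := bContainedBy all_in
  (all_in.foldl (fun children p =>
      let descSet := PySem.Set.ofList p.2
      let direct := p.2.filter (fun y =>
        (PySem.Set.diff (PySem.Set.inter (cb.getD y []) descSet) [y]).isEmpty)
      if direct.isEmpty then children else children.insert p.1 direct)
    PySem.Dict.empty).items

-- ===== PRECONDITION & SPEC =====
-- Pre_ requires the association list to have distinct keys: it encodes a Python dict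
-- (A's parameter type), which cannot contain duplicate keys, so duplicate-key lists
-- correspond to no input of A.
def Pre_build_direct_children (all_in : List (String × List String)) : Prop :=
  (all_in.map (·.1)).Nodup
instance (all_in : List (String × List String)) : Decidable (Pre_build_direct_children all_in) := by unfold Pre_build_direct_children; infer_instance
def pvWitness_build_direct_children : (List (String × List String)) :=
  [("a", ["b", "c"]), ("b", ["c"])]

def Spec_build_direct_children (all_in : List (String × List String)) (out : List (String × List String)) : Prop := out = build_direct_children_alt all_in
instance (all_in : List (String × List String)) (out : List (String × List String)) : Decidable (Spec_build_direct_children all_in out) := by unfold Spec_build_direct_children; infer_instance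

-- ===== CLAIM (what is proved, stated in full; the proofs are below) =====
def Claim_equal_build_direct_children : Prop := ∀ (all_in : List (String × List String)), Dom_build_direct_children all_in → Pre_build_direct_children all_in → Spec_build_direct_children all_in (build_direct_children all_in)

-- ===== LEMMAS AND PROOFS =====

-- membership in contained_by, inner loop
theorem cb_inner_mem (x : String) (ds : List String)
    (cb : PySem.Dict String (PySem.Set String)) (y z : String) :
    z ∈ (ds.foldl (fun cb y => cb.modify y [] (fun s => PySem.Set.add s x)) cb).getD y []
      ↔ z ∈ cb.getD y [] ∨ (z = x ∧ y ∈ ds) := by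
  induction ds generalizing cb with
  | nil => simp
  | cons d ds ih =>
    simp only [List.foldl_cons, ih, PySem.Dict.getD_modify, List.mem_cons]
    by_cases h : y = d
    · subst h
      simp only [if_pos trivial, PySem.Set.mem_add]
      tauto
    · simp only [if_neg h]
      tauto

-- membership in contained_by, outer loop
theorem cb_mem (l : List (String × List String))
    (cb : PySem.Dict String (PySem.Set String)) (y z : String) :
    z ∈ (l.foldl (fun cb p =>
          p.2.foldl (fun cb y => cb.modify y [] (fun s => PySem.Set.add s p.1)) cb) cb).getD y []
      ↔ z ∈ cb.getD y [] ∨ ∃ p ∈ l, p.1 = z ∧ y ∈ p.2 := by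
  induction l generalizing cb with
  | nil => simp
  | cons p l ih =>
    simp only [List.foldl_cons, ih, cb_inner_mem, List.mem_cons]
    constructor
    · rintro (⟨h | ⟨rfl, hy⟩⟩ | ⟨q, hq, rfl, hy⟩)
      · exact .inl h
      · exact .inr ⟨p, .inl rfl, rfl, hy⟩
      · exact .inr ⟨q, .inr hq, rfl, hy⟩
    · rintro (h | ⟨q, (rfl | hq), rfl, hy⟩)
      · exact .inl (.inl h)
      · exact .inl (.inr ⟨rfl, hy⟩)
      · exact .inr ⟨q, hq, rfl, hy⟩

theorem cbContainedBy_mem (all_in : List (String × List String)) (y z : String) :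
    z ∈ (bContainedBy all_in).getD y [] ↔ ∃ p ∈ all_in, p.1 = z ∧ y ∈ p.2 := by
  unfold bContainedBy
  rw [cb_mem]
  simp

-- first-match lookup under nodup keys
theorem lookup_mem (all_in : List (String × List String))
    (hnd : (all_in.map (·.1)).Nodup) (z y : String) :
    (((PySem.Dict.mk all_in).getD z []).contains y = true)
      ↔ ∃ p ∈ all_in, p.1 = z ∧ y ∈ p.2 := by
  have hk : (PySem.Dict.mk all_in).keys.Nodup := hnd
  rw [PySem.Dict.getD_eq_get?_getD]
  constructor
  · intro h
    cases hg : (PySem.Dict.mk all_in).get? z with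
    | none => rw [hg] at h; simp at h
    | some v =>
      rw [hg] at h
      simp only [Option.getD_some, List.contains_eq_mem, decide_eq_true_eq] at h
      exact ⟨(z, v), PySem.Dict.mem_items_of_get?_eq_some _ hg, rfl, h⟩
  · rintro ⟨⟨z', v⟩, hp, rfl, hy⟩
    rw [PySem.Dict.get?_of_mem_items _ hp hk]
    simpa using hy

-- B's filter predicate is the negation of A's indirectness test (under nodup keys)
theorem keep_eq_not_aIndirect (all_in : List (String × List String))
    (hnd : (all_in.map (·.1)).Nodup) (ds : List String) (y : String) :
    (PySem.Set.diff (PySem.Set.inter ((bContainedBy all_in).getD y []) (PySem.Set.ofList ds)) [y]).isEmpty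
      = !aIndirect all_in ds y := by
  have hml : ∀ z : String,
      z ∈ (PySem.Set.diff (PySem.Set.inter ((bContainedBy all_in).getD y [])
            (PySem.Set.ofList ds)) [y])
        ↔ (∃ p ∈ all_in, p.1 = z ∧ y ∈ p.2) ∧ z ∈ ds ∧ z ≠ y := by
    intro z
    rw [PySem.Set.mem_diff, PySem.Set.mem_inter, cbContainedBy_mem, PySem.Set.mem_ofList]
    simp [and_assoc]
  have ha : aIndirect all_in ds y = true
      ↔ ∃ z : String, (∃ p ∈ all_in, p.1 = z ∧ y ∈ p.2) ∧ z ∈ ds ∧ z ≠ y := by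
    simp only [aIndirect, List.any_eq_true, Bool.and_eq_true, bne_iff_ne]
    constructor
    · rintro ⟨z, hz, hne, hc⟩
      exact ⟨z, (lookup_mem all_in hnd z y).mp hc, hz, hne⟩
    · rintro ⟨z, hp, hz, hne⟩
      exact ⟨z, hz, hne, (lookup_mem all_in hnd z y).mpr hp⟩
  rcases haI : aIndirect all_in ds y with _ | _
  · -- no indirect witness: the set is empty
    have hno : ¬ ∃ z : String, (∃ p ∈ all_in, p.1 = z ∧ y ∈ p.2) ∧ z ∈ ds ∧ z ≠ y := by
      rw [← ha, haI]; simp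
    simp only [Bool.not_false, List.isEmpty_iff, List.eq_nil_iff_forall_not_mem]
    intro z hz
    exact hno ⟨z, (hml z).mp hz⟩
  · -- an indirect witness z is a member of the set
    obtain ⟨z, hz⟩ := ha.mp haI
    have hz' := (hml z).mpr hz
    simp only [Bool.not_true]
    rcases he : (List.isEmpty ((((bContainedBy all_in).getD y []).inter
        (PySem.Set.ofList ds)).diff [y])) with _ | _
    · rfl
    · rw [List.isEmpty_iff] at he
      rw [he] at hz'
      exact absurd hz' (by simp)

-- A's per-entry loop collapses to one conditional insert of the filtered list
theorem a_inner (f : String → Bool) (xk : String) :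
    ∀ (ds : List String) (ch : PySem.Dict String (List String)),
    ds.foldl (fun ch y => if f y then ch.insert xk (ch.getD xk [] ++ [y]) else ch) ch
      = if (ds.filter f).isEmpty then ch
        else ch.insert xk (ch.getD xk [] ++ ds.filter f) := by
  intro ds
  induction ds with
  | nil => intro ch; simp
  | cons y ds ih =>
    intro ch
    rcases hf : f y with _ | _
    · simp only [List.foldl_cons, hf, Bool.false_eq_true, if_false, List.filter_cons]
      exact ih ch
    · simp only [List.foldl_cons, hf, if_true, List.filter_cons, List.isEmpty_cons,
        Bool.false_eq_true, if_false]
      rw [ih]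
      rcases he : (ds.filter f).isEmpty with _ | _
      · simp only [Bool.false_eq_true, if_false, PySem.Dict.getD_insert_self,
          PySem.Dict.insert_insert_self, List.append_assoc]
        simp
      · simp only [if_true]
        simp only [List.isEmpty_iff] at he
        simp [he]

-- a fold of conditional inserts at fresh distinct keys appends its items
theorem outer_items (L : String × List String → List String) :
    ∀ (l : List (String × List String)) (ch : PySem.Dict String (List String)),
    (∀ p ∈ l, ch.contains p.1 = false) → (l.map (·.1)).Nodup →
    (l.foldl (fun ch p =>
        if (L p).isEmpty then ch else ch.insert p.1 (ch.getD p.1 [] ++ L p)) ch).items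
      = ch.items ++ l.filterMap (fun p => if (L p).isEmpty then none else some (p.1, L p)) := by
  intro l
  induction l with
  | nil => intro ch _ _; simp
  | cons p l ih =>
    intro ch hfresh hnd
    simp only [List.map_cons, List.nodup_cons] at hnd
    rcases he : (L p).isEmpty with _ | _
    · have hgd : ch.getD p.1 [] = [] :=
        PySem.Dict.getD_of_not_contains _ _ (hfresh p (List.mem_cons_self ..))
      simp only [List.foldl_cons, he, Bool.false_eq_true, if_false, List.filterMap_cons]
      rw [ih (ch.insert p.1 (ch.getD p.1 [] ++ L p))
            (fun q hq => by
              rw [PySem.Dict.contains_insert]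
              have : q.1 ≠ p.1 := fun hqp => hnd.1 (hqp ▸ List.mem_map_of_mem hq)
              simp [this, hfresh q (List.mem_cons_of_mem _ hq)])
            hnd.2]
      rw [PySem.Dict.items_insert_of_not_contains _ _ (hfresh p (List.mem_cons_self ..)), hgd]
      simp
    · simp only [List.foldl_cons, he, if_pos trivial, List.filterMap_cons]
      rw [ih ch (fun q hq => hfresh q (List.mem_cons_of_mem _ hq)) hnd.2]

-- version of outer_items matching B's step (no getD-append, same result on fresh keys)
theorem outer_items_b (L : String × List String → List String) :
    ∀ (l : List (String × List String)) (ch : PySem.Dict String (List String)),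
    (∀ p ∈ l, ch.contains p.1 = false) → (l.map (·.1)).Nodup →
    (l.foldl (fun ch p => if (L p).isEmpty then ch else ch.insert p.1 (L p)) ch).items
      = ch.items ++ l.filterMap (fun p => if (L p).isEmpty then none else some (p.1, L p)) := by
  intro l
  induction l with
  | nil => intro ch _ _; simp
  | cons p l ih =>
    intro ch hfresh hnd
    simp only [List.map_cons, List.nodup_cons] at hnd
    rcases he : (L p).isEmpty with _ | _
    · simp only [List.foldl_cons, he, Bool.false_eq_true, if_false, List.filterMap_cons]
      rw [ih (ch.insert p.1 (L p))
            (fun q hq => by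
              rw [PySem.Dict.contains_insert]
              have : q.1 ≠ p.1 := fun hqp => hnd.1 (hqp ▸ List.mem_map_of_mem hq)
              simp [this, hfresh q (List.mem_cons_of_mem _ hq)])
            hnd.2]
      rw [PySem.Dict.items_insert_of_not_contains _ _ (hfresh p (List.mem_cons_self ..))]
      simp
    · simp only [List.foldl_cons, he, if_pos trivial, List.filterMap_cons]
      rw [ih ch (fun q hq => hfresh q (List.mem_cons_of_mem _ hq)) hnd.2]

-- ===== VERDICT (by name: the statement is the Claim_ definition above) =====
theorem build_direct_children_spec : Claim_equal_build_direct_children := by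
  intro all_in _ hpre
  unfold Spec_build_direct_children
  unfold build_direct_children build_direct_children_alt
  have hnd : (all_in.map (·.1)).Nodup := hpre
  -- rewrite A's step into the canonical conditional-insert step
  have hA : (all_in.foldl (fun children p =>
      p.2.foldl (fun ch y =>
        if !aIndirect all_in p.2 y then ch.insert p.1 (ch.getD p.1 [] ++ [y]) else ch) children)
      PySem.Dict.empty)
      = all_in.foldl (fun ch p =>
          if (p.2.filter (fun y => !aIndirect all_in p.2 y)).isEmpty then ch
          else ch.insert p.1 (ch.getD p.1 [] ++ p.2.filter (fun y => !aIndirect all_in p.2 y)))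
        PySem.Dict.empty := by
    congr 1
    funext ch p
    exact a_inner (fun y => !aIndirect all_in p.2 y) p.1 p.2 ch
  rw [hA]
  -- rewrite B's filter predicate into the same predicate
  have hB : ∀ p : String × List String,
      p.2.filter (fun y =>
        (PySem.Set.diff (PySem.Set.inter ((bContainedBy all_in).getD y [])
          (PySem.Set.ofList p.2)) [y]).isEmpty)
      = p.2.filter (fun y => !aIndirect all_in p.2 y) := by
    intro p
    apply List.filter_congr
    intro y _
    exact keep_eq_not_aIndirect all_in hnd p.2 y
  have hfresh : ∀ p ∈ all_in, (PySem.Dict.empty : PySem.Dict String (List String)).contains p.1 = false := by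
    intro p _; simp
  rw [outer_items (fun p => p.2.filter (fun y => !aIndirect all_in p.2 y)) all_in _ hfresh hnd]
  simp only [hB]
  rw [outer_items_b (fun p => p.2.filter (fun y => !aIndirect all_in p.2 y)) all_in _ hfresh hnd]
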